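-- pv_equiv track=rewrite | github.com/s2e-lab/Code-Smell-Code-Generation | Validation/PylintSamples/E0107_0746.py | treeProduct
-- ===== SOURCE A (Python) =====
-- def treeProduct(num, h, root, ch):
--  if ch >= h:
--   return num[root]
--
--  left = (root * 2) + 1
--  right = (root * 2) + 2
--
--  ret1 = treeProduct(num, h, left, ch + 1)
--  ret2 = treeProduct(num, h, right, ch + 1)
--
--  return num[root] * max(ret1, ret2)
-- ===== SOURCE B (Python) =====
-- def treeProduct(num, h, root, ch):
--     if ch >= h:
--         return num[root]
--     d = h - ch
--     lo = root * 2**d + 2**d - 1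
--     level = [num[i] for i in range(lo, lo + 2**d)]
--     for _ in range(d):
--         lo = (lo - 1) // 2
--         level = [num[lo + j] * max(level[2 * j], level[2 * j + 1])
--                  for j in range(len(level) // 2)]
--     return level[0]
-- ===== Notes on version B (the rewrite author's own statement) =====
-- stated objective: alternative
-- what changed: Replaces A's top-down binary recursion with an iterative bottom-up DP: seed the contiguous heap-index range of the leaf level and repeatedly combine adjacent pairs with the parent value until one value remains.
import Mathlib
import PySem

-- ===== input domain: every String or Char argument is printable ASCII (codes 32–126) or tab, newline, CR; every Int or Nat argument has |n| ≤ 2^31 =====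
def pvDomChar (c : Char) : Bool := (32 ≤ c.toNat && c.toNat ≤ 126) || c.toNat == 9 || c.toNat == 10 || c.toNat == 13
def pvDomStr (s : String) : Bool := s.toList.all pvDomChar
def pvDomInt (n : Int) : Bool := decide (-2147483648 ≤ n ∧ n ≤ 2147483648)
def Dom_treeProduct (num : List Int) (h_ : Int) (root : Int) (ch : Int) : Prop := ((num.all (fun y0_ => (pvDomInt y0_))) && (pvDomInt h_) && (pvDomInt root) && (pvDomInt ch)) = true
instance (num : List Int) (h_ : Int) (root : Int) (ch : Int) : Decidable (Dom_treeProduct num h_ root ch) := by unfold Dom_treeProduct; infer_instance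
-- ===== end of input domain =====

-- B replaces A's top-down recursion by an iterative bottom-up DP: seed the contiguous
-- heap-index range of the leaf level, then fold pairs upward (objective: alternative).

-- ===== PORT A =====
-- literal port of A's recursion; num[root] is pyGetD (in range under Pre_)
def treeProduct (num : List Int) (h_ : Int) (root : Int) (ch : Int) : Int :=
  if ch ≥ h_ then PySem.List.pyGetD num root 0
  else
    let left := (root * 2) + 1
    let right := (root * 2) + 2
    let ret1 := treeProduct num h_ left (ch + 1)
    let ret2 := treeProduct num h_ right (ch + 1)
    PySem.List.pyGetD num root 0 * max ret1 ret2
termination_by (h_ - ch).toNat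
decreasing_by all_goals omega

-- ===== PORT B =====
-- the 'for _ in range(d)' loop of Source B, carrying (lo, level)
def pvUpLoop (num : List Int) : Nat → Int → List Int → Int × List Int
  | 0, lo, level => (lo, level)
  | k + 1, lo, level =>
      let lo2 := PySem.Int.floordiv (lo - 1) 2
      let level2 := (List.range (level.length / 2)).map
        (fun (j : Nat) => PySem.List.pyGetD num (lo2 + (j : Int)) 0 *
          max (level.getD (2 * j) 0) (level.getD (2 * j + 1) 0))
      pvUpLoop num k lo2 level2

def treeProduct_alt (num : List Int) (h_ : Int) (root : Int) (ch : Int) : Int :=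
  if ch ≥ h_ then PySem.List.pyGetD num root 0
  else
    let d := (h_ - ch).toNat
    let lo := root * 2 ^ d + 2 ^ d - 1
    let level := (PySem.List.pyRange lo (lo + 2 ^ d) 1).map (fun i => PySem.List.pyGetD num i 0)
    let res := pvUpLoop num d lo level
    PySem.List.pyGetD res.2 0 0

-- ===== PRECONDITION & SPEC =====
-- Pre_ := exactly the inputs where A returns: every heap index A visits (levels 0..h-ch
-- below root, a contiguous range per level) is a valid Python index of num.  The depth
-- bound 'h_ - ch ≤ num.length' is implied by the level-(h_-ch) index condition (which
-- forces 2^(h_-ch) ≤ num.length + 1); it is written first only so the Decidable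
-- instance short-circuits without materialising List.range of a huge h_ - ch.
def Pre_treeProduct (num : List Int) (h_ : Int) (root : Int) (ch : Int) : Prop :=
  if ch ≥ h_ then -(num.length : Int) ≤ root ∧ root < (num.length : Int)
  else h_ - ch ≤ (num.length : Int) ∧ ∀ k ∈ List.range ((h_ - ch).toNat + 1),
    -(num.length : Int) ≤ (root + 1) * 2 ^ k - 1 ∧ (root + 2) * 2 ^ k - 2 < (num.length : Int)
instance (num : List Int) (h_ : Int) (root : Int) (ch : Int) : Decidable (Pre_treeProduct num h_ root ch) := by unfold Pre_treeProduct; infer_instance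

def pvWitness_treeProduct : List Int × Int × Int × Int := ([3, 1, 2], 1, 0, 0)

def Spec_treeProduct (num : List Int) (h_ : Int) (root : Int) (ch : Int) (out : Int) : Prop := out = treeProduct_alt num h_ root ch
instance (num : List Int) (h_ : Int) (root : Int) (ch : Int) (out : Int) : Decidable (Spec_treeProduct num h_ root ch out) := by unfold Spec_treeProduct; infer_instance

-- ===== CLAIM (what is proved, stated in full; the proofs are below) =====
def Claim_equal_treeProduct : Prop := ∀ (num : List Int) (h_ : Int) (root : Int) (ch : Int), Dom_treeProduct num h_ root ch → Pre_treeProduct num h_ root ch → Spec_treeProduct num h_ root ch (treeProduct num h_ root ch)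

-- ===== LEMMAS AND PROOFS =====

-- common denotation: value of the max-product recursion at depth d below root
def pvAv (num : List Int) (root : Int) : Nat → Int
  | 0 => PySem.List.pyGetD num root 0
  | d + 1 => PySem.List.pyGetD num root 0 *
      max (pvAv num (root * 2 + 1) d) (pvAv num (root * 2 + 2) d)

theorem treeProduct_eq_pvAv (num : List Int) (h_ : Int) :
    ∀ (d : Nat) (root ch : Int), (h_ - ch).toNat = d →
      treeProduct num h_ root ch = pvAv num root d := by
  intro d
  induction d with
  | zero =>
      intro root ch hd
      rw [treeProduct]
      have : ch ≥ h_ := by omega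
      simp [this, pvAv]
  | succ d ih =>
      intro root ch hd
      rw [treeProduct]
      have hlt : ¬ ch ≥ h_ := by omega
      simp only [hlt, if_false]
      rw [ih (root * 2 + 1) (ch + 1) (by omega), ih (root * 2 + 2) (ch + 1) (by omega)]
      rfl

theorem pvUpLoop_eq_pvAv (num : List Int) :
    ∀ (k : Nat) (r : Int) (m : Nat),
      pvUpLoop num k (r * 2 ^ k + 2 ^ k - 1)
        ((List.range (2 ^ k)).map (fun (j : Nat) => pvAv num (r * 2 ^ k + 2 ^ k - 1 + (j : Int)) m))
        = (r, [pvAv num r (m + k)]) := by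
  intro k
  induction k with
  | zero =>
      intro r m
      simp [pvUpLoop]
  | succ k ih =>
      intro r m
      simp only [pvUpLoop]
      have hpow : (2 : Int) ^ (k + 1) = 2 ^ k * 2 := by ring
      have hr : r * (2 : Int) ^ (k + 1) = (r * 2 ^ k) * 2 := by ring
      have hlo2 : PySem.Int.floordiv (r * 2 ^ (k + 1) + 2 ^ (k + 1) - 1 - 1) 2
          = r * 2 ^ k + 2 ^ k - 1 := by
        rw [PySem.Int.floordiv_eq_iff_of_pos (by omega)]
        constructor <;> linarith [hpow, hr]
      have hlen : ((List.range (2 ^ (k + 1))).map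
          (fun (j : Nat) => pvAv num (r * 2 ^ (k + 1) + 2 ^ (k + 1) - 1 + (j : Int)) m)).length / 2
          = 2 ^ k := by
        rw [List.length_map, List.length_range, Nat.pow_succ,
          Nat.mul_div_cancel _ (by norm_num)]
      rw [hlo2, hlen]
      have hmap : (List.range (2 ^ k)).map
            (fun (j : Nat) => PySem.List.pyGetD num (r * 2 ^ k + 2 ^ k - 1 + (j : Int)) 0 *
              max (((List.range (2 ^ (k + 1))).map
                  (fun (j : Nat) => pvAv num (r * 2 ^ (k + 1) + 2 ^ (k + 1) - 1 + (j : Int)) m)).getD (2 * j) 0)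
                (((List.range (2 ^ (k + 1))).map
                  (fun (j : Nat) => pvAv num (r * 2 ^ (k + 1) + 2 ^ (k + 1) - 1 + (j : Int)) m)).getD (2 * j + 1) 0))
          = (List.range (2 ^ k)).map
            (fun (j : Nat) => pvAv num (r * 2 ^ k + 2 ^ k - 1 + (j : Int)) (m + 1)) := by
        apply List.map_congr_left
        intro j hj
        rw [List.mem_range] at hj
        have hp : 2 ^ (k + 1) = 2 ^ k * 2 := Nat.pow_succ 2 k
        have h1 : 2 * j < 2 ^ (k + 1) := by omega
        have h2 : 2 * j + 1 < 2 ^ (k + 1) := by omega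
        rw [List.getD_eq_getElem?_getD, List.getD_eq_getElem?_getD]
        simp only [List.getElem?_map, List.getElem?_range, h1, h2,
          Option.map_some, Option.getD_some]
        have e1 : r * 2 ^ (k + 1) + 2 ^ (k + 1) - 1 + ((2 * j : Nat) : Int)
            = (r * 2 ^ k + 2 ^ k - 1 + (j : Int)) * 2 + 1 := by push_cast; ring
        have e2 : r * 2 ^ (k + 1) + 2 ^ (k + 1) - 1 + ((2 * j + 1 : Nat) : Int)
            = (r * 2 ^ k + 2 ^ k - 1 + (j : Int)) * 2 + 2 := by push_cast; ring
        rw [e1, e2, pvAv]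
      rw [hmap, ih]
      have hmk : m + 1 + k = m + (k + 1) := by omega
      rw [hmk]

theorem alt_eq_pvAv (num : List Int) (h_ root ch : Int) :
    treeProduct_alt num h_ root ch = pvAv num root (h_ - ch).toNat := by
  unfold treeProduct_alt
  by_cases hge : ch ≥ h_
  · have h0 : (h_ - ch).toNat = 0 := by omega
    simp [hge, h0, pvAv]
  · simp only [hge, if_false]
    set d := (h_ - ch).toNat with hd
    have hlevel : (PySem.List.pyRange (root * 2 ^ d + 2 ^ d - 1)
          (root * 2 ^ d + 2 ^ d - 1 + 2 ^ d) 1).map (fun i => PySem.List.pyGetD num i 0)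
        = (List.range (2 ^ d)).map
            (fun (j : Nat) => pvAv num (root * 2 ^ d + 2 ^ d - 1 + (j : Int)) 0) := by
      rw [PySem.List.pyRange_one, List.map_map]
      have hcnt : (root * 2 ^ d + 2 ^ d - 1 + 2 ^ d - (root * 2 ^ d + 2 ^ d - 1)).toNat
          = 2 ^ d := by
        have he : root * 2 ^ d + 2 ^ d - 1 + 2 ^ d - (root * 2 ^ d + 2 ^ d - 1)
            = ((2 ^ d : Nat) : Int) := by push_cast; ring
        rw [he, Int.toNat_natCast]
      rw [hcnt]
      rfl
    rw [hlevel, pvUpLoop_eq_pvAv num d root 0]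
    simp [PySem.List.pyGetD_zero_cons]

-- ===== VERDICT (by name: the statement is the Claim_ definition above) =====
theorem treeProduct_spec : Claim_equal_treeProduct := by
  intro num h_ root ch _ _
  unfold Spec_treeProduct
  rw [treeProduct_eq_pvAv num h_ (h_ - ch).toNat root ch rfl, alt_eq_pvAv]
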